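-- pv_equiv track=rewrite | github.com/jhe16/PerfSig | logs/logprocessing.py | getpruneset
-- ===== SOURCE A (Python) =====
-- def getpruneset(labels):
-- 	candlogidx = {}   # build dict based on label
-- 	for i in range(len(labels)):
-- 		if labels[i] not in candlogidx:
-- 			candlogidx[labels[i]] = [i]
-- 		else:
-- 			candlogidx[labels[i]].append(i)
--
-- 	freqthres = 3
--
-- 	pruneset = []      # choose log entries with frequency over 3
-- 	for l in candlogidx:
-- 		if len(candlogidx[l]) >= freqthres:
-- 			pruneset += candlogidx[l]
--
-- 	pruneset.sort()
-- 	return pruneset, candlogidx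
-- ===== SOURCE B (Python) =====
-- def getpruneset(labels):
-- 	# Count labels first, then one index-order pass: qualifying indices are
-- 	# appended in increasing order, so no sort is needed.
-- 	counts = {}
-- 	for l in labels:
-- 		counts[l] = counts.get(l, 0) + 1
-- 	pruneset = []
-- 	candlogidx = {}
-- 	for i, l in enumerate(labels):
-- 		candlogidx.setdefault(l, []).append(i)
-- 		if counts[l] >= 3:
-- 			pruneset.append(i)
-- 	return pruneset, candlogidx
-- ===== Notes on version B (the rewrite author's own statement) =====
-- stated objective: alternative
-- what changed: Instead of grouping indices per label and sorting the concatenation of the frequent groups, B counts labels in a first pass and then appends qualifying indices in a single index-order pass, so the result is already in order and no sort is performed.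
import Mathlib
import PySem

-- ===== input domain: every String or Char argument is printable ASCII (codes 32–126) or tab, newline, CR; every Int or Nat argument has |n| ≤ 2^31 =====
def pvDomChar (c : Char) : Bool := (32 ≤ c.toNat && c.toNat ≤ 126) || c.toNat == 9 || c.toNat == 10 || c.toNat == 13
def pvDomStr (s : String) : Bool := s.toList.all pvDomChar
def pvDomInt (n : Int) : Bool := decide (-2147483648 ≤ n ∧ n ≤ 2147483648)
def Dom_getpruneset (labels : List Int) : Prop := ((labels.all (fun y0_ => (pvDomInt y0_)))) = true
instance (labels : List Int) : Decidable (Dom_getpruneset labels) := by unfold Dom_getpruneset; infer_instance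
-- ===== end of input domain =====

-- B replaces A's group-then-sort by a counting pass plus one index-order pass (no sort); alternative algorithm, same cost.

-- ===== PORT A =====
def getpruneset (labels : List Int) : List Int × (List (Int × List Int)) :=
  -- 'for i in range(len(labels)): if labels[i] not in candlogidx: … else: ….append(i)'
  let candlogidx : PySem.Dict Int (List Int) :=
    (PySem.List.pyRange 0 (labels.length : Int) 1).foldl
      (fun d i =>
        if d.contains (PySem.List.pyGetD labels i 0) = false then
          d.insert (PySem.List.pyGetD labels i 0) [i]
        else
          d.modify (PySem.List.pyGetD labels i 0) [] (· ++ [i]))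
      PySem.Dict.empty
  let freqthres : Int := 3
  -- 'for l in candlogidx: if len(candlogidx[l]) >= freqthres: pruneset += candlogidx[l]'
  let pruneset : List Int :=
    candlogidx.keys.foldl
      (fun acc l =>
        if freqthres ≤ ((candlogidx.getD l []).length : Int) then acc ++ candlogidx.getD l []
        else acc)
      []
  (PySem.List.sorted pruneset (fun x => x) false, candlogidx.items)

-- ===== PORT B =====
def getpruneset_alt (labels : List Int) : List Int × (List (Int × List Int)) :=
  -- 'counts[l] = counts.get(l, 0) + 1'
  let counts : PySem.Dict Int Int :=
    labels.foldl (fun d l => d.insert l (d.getD l 0 + 1)) PySem.Dict.empty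
  -- one pass over enumerate(labels); 'candlogidx.setdefault(l, []).append(i)' sets
  -- candlogidx[l] = candlogidx.get(l, []) + [i], which is exactly Dict.modify l [] (· ++ [i])
  let st : List Int × PySem.Dict Int (List Int) :=
    (PySem.List.enumerate labels 0).foldl
      (fun s p =>
        (if (3 : Int) ≤ counts.getD p.2 0 then s.1 ++ [p.1] else s.1,
         s.2.modify p.2 [] (· ++ [p.1])))
      ([], PySem.Dict.empty)
  (st.1, st.2.items)

-- ===== PRECONDITION & SPEC =====
def Spec_getpruneset (labels : List Int) (out : List Int × (List (Int × List Int))) : Prop := out = getpruneset_alt labels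
instance (labels : List Int) (out : List Int × (List (Int × List Int))) : Decidable (Spec_getpruneset labels out) := by unfold Spec_getpruneset; infer_instance

-- ===== CLAIM (what is proved, stated in full; the proofs are below) =====
def Claim_equal_getpruneset : Prop := ∀ (labels : List Int), Dom_getpruneset labels → Spec_getpruneset labels (getpruneset labels)

-- ===== LEMMAS AND PROOFS =====

def bigD (labels : List Int) : PySem.Dict Int (List Int) :=
  (PySem.List.enumerate labels 0).foldl (fun d p => d.modify p.2 [] (· ++ [p.1])) PySem.Dict.empty

theorem insert_eq_modify (d : PySem.Dict Int (List Int)) (k i : Int) (h : d.contains k = false) :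
    d.insert k [i] = d.modify k [] (· ++ [i]) := by
  simp [PySem.Dict.modify, PySem.Dict.insert, h, PySem.Dict.getD_of_not_contains d [] h]

theorem a_dict_eq (labels : List Int) :
    (PySem.List.pyRange 0 (labels.length : Int) 1).foldl
      (fun d i =>
        if d.contains (PySem.List.pyGetD labels i 0) = false then
          d.insert (PySem.List.pyGetD labels i 0) [i]
        else
          d.modify (PySem.List.pyGetD labels i 0) [] (· ++ [i]))
      PySem.Dict.empty = bigD labels := by
  have he := PySem.List.enumerate_eq_map_pyRange (xs := labels) (d := 0)
  rw [bigD, he, List.foldl_map]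
  apply PySem.List.foldl_congr_mem
  intro acc x hx
  by_cases h : acc.contains (PySem.List.pyGetD labels x 0)
  · simp [h]
  · have hc : acc.contains (PySem.List.pyGetD labels x 0) = false := by simpa using h
    simp [hc, insert_eq_modify _ _ _ hc]

theorem b_pair_eq (labels : List Int) (counts : PySem.Dict Int Int) :
    ((PySem.List.enumerate labels 0).foldl
      (fun (s : List Int × PySem.Dict Int (List Int)) p =>
        (if (3 : Int) ≤ counts.getD p.2 0 then s.1 ++ [p.1] else s.1,
         s.2.modify p.2 [] (· ++ [p.1])))
      ([], PySem.Dict.empty))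
    = (((PySem.List.enumerate labels 0).filter
          (fun p => decide ((3:Int) ≤ counts.getD p.2 0))).map (·.1),
       bigD labels) := by
  rw [PySem.List.foldl_prod_mk
        (f := fun (acc : List Int) (p : Int × Int) =>
          if (3 : Int) ≤ counts.getD p.2 0 then acc ++ [p.1] else acc)
        (g := fun (d : PySem.Dict Int (List Int)) (p : Int × Int) =>
          d.modify p.2 [] (· ++ [p.1]))]
  rw [PySem.List.foldl_ite_eq_foldl_filter, PySem.List.foldl_append_singleton_eq_map]
  rfl

def idxOf (labels : List Int) (c : Int) : List Int :=
  ((PySem.List.enumerate labels 0).filter (fun p => p.2 == c)).map (·.1)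

theorem getD_bigD (labels : List Int) (c : Int) :
    (bigD labels).getD c [] = idxOf labels c := by
  have : bigD labels
      = ((PySem.List.enumerate labels 0).map Prod.swap).foldl
          (fun d p => d.modify p.1 [] (· ++ [p.2])) PySem.Dict.empty := by
    rw [List.foldl_map]; rfl
  rw [this, PySem.Dict.getD_foldl_modify_append, idxOf]
  simp [List.filter_map, Function.comp_def, List.map_map]

theorem keys_bigD (labels : List Int) :
    (bigD labels).keys = PySem.Set.ofList labels := by
  rw [bigD, PySem.Dict.keys_foldl_modify_key (key := fun p : Int × Int => p.2)]
  simp [PySem.List.map_snd_enumerate, PySem.Set.update, PySem.Set.ofList_eq_foldl]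

theorem length_idxOf (labels : List Int) (c : Int) :
    (idxOf labels c).length = labels.count c := by
  rw [idxOf, List.length_map, ← List.countP_eq_length_filter]
  conv_rhs => rw [← PySem.List.map_snd_enumerate (xs := labels) (s := 0)]
  rw [List.count, List.countP_map]
  rfl

theorem mem_idxOf (labels : List Int) (c i : Int) :
    i ∈ idxOf labels c ↔ ∃ (k : Nat) (h : k < labels.length), i = (k : Int) ∧ labels[k] = c := by
  simp [idxOf, List.mem_filter, PySem.List.mem_enumerate_iff]

theorem idxOf_nodup (labels : List Int) (c : Int) : (idxOf labels c).Nodup := by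
  have hp : ((PySem.List.enumerate labels 0).filter (fun p => p.2 == c)).Pairwise
      (fun p q : Int × Int => p.1 < q.1) :=
    (PySem.List.pairwise_lt_enumerate labels 0).filter _
  have : (idxOf labels c).Pairwise (fun a b : Int => a < b) := List.pairwise_map.mpr hp
  exact this.imp ne_of_lt

theorem idxOf_disjoint (labels : List Int) (a b : Int) (hab : a ≠ b) :
    ∀ i, i ∈ idxOf labels a → i ∈ idxOf labels b → False := by
  intro i ha hb
  obtain ⟨k, hk, hik, hka⟩ := (mem_idxOf labels a i).mp ha
  obtain ⟨k', hk', hik', hkb⟩ := (mem_idxOf labels b i).mp hb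
  have hkk : (k : Int) = (k' : Int) := by rw [← hik, hik']
  have hkk2 : k = k' := by exact_mod_cast hkk
  subst hkk2
  exact hab (by rw [← hka, hkb])

theorem pruneset_eq (labels : List Int) :
    PySem.List.sorted
      (((PySem.Set.ofList labels).filter
          (fun l => decide ((3:Int) ≤ ((idxOf labels l).length : Int)))).flatMap (idxOf labels))
      (fun x => x) false
    = ((PySem.List.enumerate labels 0).filter
        (fun p => decide ((3:Int) ≤ (labels.count p.2 : Int)))).map (·.1) := by
  simp only [length_idxOf]
  apply PySem.List.sorted_eq_of_perm_of_pairwise_lt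
  · -- perm
    have hnB : (((PySem.List.enumerate labels 0).filter
        (fun p => decide ((3:Int) ≤ (labels.count p.2 : Int)))).map (·.1)).Nodup := by
      have hp := (PySem.List.pairwise_lt_enumerate labels 0).filter
        (fun p => decide ((3:Int) ≤ (labels.count p.2 : Int)))
      exact (List.pairwise_map.mpr hp).imp ne_of_lt
    have hnA : (((PySem.Set.ofList labels).filter
        (fun l => decide ((3:Int) ≤ (labels.count l : Int)))).flatMap (idxOf labels)).Nodup := by
      refine List.nodup_flatMap.mpr ⟨fun x _ => idxOf_nodup labels x, ?_⟩
      refine ((PySem.Set.nodup_ofList labels).filter _).imp ?_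
      intro a b hab
      exact List.disjoint_left.mpr (fun i hia hib => idxOf_disjoint labels a b hab i hia hib)
    refine (List.perm_ext_iff_of_nodup hnB hnA).mpr ?_
    intro i
    simp only [List.mem_map, List.mem_filter, List.mem_flatMap, PySem.Set.mem_ofList,
      PySem.List.mem_enumerate_iff, mem_idxOf]
    constructor
    · rintro ⟨p, ⟨⟨k, hk, hp⟩, hq⟩, hx⟩
      subst hp
      exact ⟨labels[k], ⟨List.getElem_mem hk, by simpa using hq⟩,
        ⟨k, hk, by simpa using hx.symm, rfl⟩⟩
    · rintro ⟨l, ⟨hl, hq⟩, ⟨k, hk, rfl, hkl⟩⟩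
      exact ⟨((k : Int), l), ⟨⟨k, hk, by simp [hkl]⟩, hq⟩, rfl⟩
  · -- pairwise
    have hp := (PySem.List.pairwise_lt_enumerate labels 0).filter
      (fun p => decide ((3:Int) ≤ (labels.count p.2 : Int)))
    exact List.pairwise_map.mpr hp

-- ===== VERDICT (by name: the statement is the Claim_ definition above) =====
theorem getpruneset_spec : Claim_equal_getpruneset := by
  intro labels _
  unfold Spec_getpruneset getpruneset getpruneset_alt
  dsimp only
  rw [a_dict_eq, b_pair_eq]
  refine Prod.ext ?_ rfl
  simp only
  rw [keys_bigD, PySem.List.foldl_ite_eq_foldl_filter, PySem.List.foldl_append_eq_flatMap]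
  simp only [getD_bigD, List.nil_append, PySem.Dict.getD_foldl_insert_add_one,
    PySem.Dict.getD_empty, zero_add]
  exact pruneset_eq labels
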